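-- pv_equiv track=rewrite | github.com/gali1998/ExtendedIntroToCSHomework | 6/testhelper.py | maxmatch1
-- ===== SOURCE A (Python) =====
-- def maxmatch1(T, p, W=2**12-1, max_length=2**5-1):
--     """ finds a maximum match of length k<=2**5-1 in a
--         W long window, T[p:p+k] with T[p-m:p-m+k].
--         Returns m (offset) and k (match length) """
--     assert isinstance(T,str)
--     n = len(T)
--     maxmatch = 0
--     offset = 0
--     for m in range(1, 1+min(p, W)):
--         k = 0
--         while k < min(n-p, max_length) and T[p-m+k] == T[p+k]:
--             k+=1  # at this point, T[p-m:p-m+k]==T[p:p+k]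
--         if k > maxmatch:
--             maxmatch = k
--             offset = m
--     return offset, maxmatch # returned offset is smallest one (closest to p)
-- ===== SOURCE B (Python) =====
-- def maxmatch1(T, p, W=2**12-1, max_length=2**5-1):
--     """Same result as A: column-wise candidate filtering instead of a
--     per-offset scan.  All offsets start as candidates; the match length k
--     is extended one position at a time, keeping only the offsets that
--     still match.  The first (smallest) surviving offset is the answer."""
--     assert isinstance(T, str)
--     n = len(T)
--     L = min(n - p, max_length)
--     cands = list(range(1, 1 + min(p, W)))
--     k = 0
--     offset = 0
--     while k < L and cands:
--         nxt = [m for m in cands if T[p - m + k] == T[p + k]]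
--         if not nxt:
--             break
--         cands = nxt
--         k += 1
--         offset = cands[0]
--     return offset, k
-- ===== Notes on version B (the rewrite author's own statement) =====
-- stated objective: alternative
-- what changed: Per-offset match-length scans with a running max are replaced by a column-wise sweep that extends the match length one position at a time while filtering the surviving candidate offsets; the first surviving offset is the answer.
import Mathlib
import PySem

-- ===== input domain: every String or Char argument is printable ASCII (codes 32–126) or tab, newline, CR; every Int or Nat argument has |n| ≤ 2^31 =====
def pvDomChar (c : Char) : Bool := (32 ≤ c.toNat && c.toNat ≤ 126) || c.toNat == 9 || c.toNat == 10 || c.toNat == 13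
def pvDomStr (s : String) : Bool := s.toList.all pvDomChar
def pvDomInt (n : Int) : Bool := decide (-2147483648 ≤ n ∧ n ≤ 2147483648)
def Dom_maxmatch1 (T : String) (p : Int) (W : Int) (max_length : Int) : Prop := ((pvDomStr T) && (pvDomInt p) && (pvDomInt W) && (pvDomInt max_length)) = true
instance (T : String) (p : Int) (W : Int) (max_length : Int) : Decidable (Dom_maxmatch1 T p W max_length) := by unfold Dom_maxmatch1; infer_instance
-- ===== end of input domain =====

-- B replaces A's per-offset match-length scans (offset-major, running max) by a column-wise
-- sweep that extends the match length one position at a time while filtering the surviving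
-- candidate offsets; same return value everywhere (both programs are total).

-- ===== PORT A =====
-- Python compares T[i] == T[j]; in A this comparison is only ever reached with both indices
-- in range (otherwise Python would raise, which never happens), so out-of-range counts as
-- a mismatch here — exact on every reachable state.
def pvCharEq (T : String) (i j : Int) : Bool :=
  match PySem.Str.pyGet? T i, PySem.Str.pyGet? T j with
  | some a, some b => a == b
  | _, _ => false

-- the inner 'while k < min(n-p, max_length) and T[p-m+k] == T[p+k]: k += 1' loop;
-- fuel L.toNat is enough: k starts at 0 and the guard k < L stops it before fuel runs out.
def pvAWhile (T : String) (p m L k : Int) (fuel : Nat) : Int :=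
  match fuel with
  | 0 => k
  | Nat.succ f =>
      if decide (k < L) && pvCharEq T (p - m + k) (p + k) then
        pvAWhile T p m L (k + 1) f
      else k

def maxmatch1 (T : String) (p : Int) (W : Int) (max_length : Int) : Int × Int :=
  let n : Int := PySem.Str.len T
  let st :=
    (PySem.List.pyRange 1 (1 + min p W) 1).foldl
      (fun (st : Int × Int) (m : Int) =>
        let L := min (n - p) max_length
        let k := pvAWhile T p m L 0 L.toNat
        if st.1 < k then (k, m) else st)
      (0, 0)
  (st.2, st.1)

-- ===== PORT B =====
-- 'while k < L and cands: nxt = [m for m in cands if T[p-m+k] == T[p+k]]; …';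
-- fuel L.toNat is enough: k starts at 0 and the guard k < L stops it before fuel runs out.
def pvBLoop (T : String) (p L k offset : Int) (cands : List Int) (fuel : Nat) : Int × Int :=
  match fuel with
  | 0 => (offset, k)
  | Nat.succ f =>
      if decide (k < L) && !cands.isEmpty then
        let nxt := cands.filter (fun m => pvCharEq T (p - m + k) (p + k))
        if nxt.isEmpty then (offset, k)
        else pvBLoop T p L (k + 1) (nxt.headD 0) nxt f
      else (offset, k)

def maxmatch1_alt (T : String) (p : Int) (W : Int) (max_length : Int) : Int × Int :=
  let n : Int := PySem.Str.len T
  let L : Int := min (n - p) max_length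
  pvBLoop T p L 0 0 (PySem.List.pyRange 1 (1 + min p W) 1) L.toNat

-- ===== PRECONDITION & SPEC =====
def Spec_maxmatch1 (T : String) (p : Int) (W : Int) (max_length : Int) (out : Int × Int) : Prop := out = maxmatch1_alt T p W max_length
instance (T : String) (p : Int) (W : Int) (max_length : Int) (out : Int × Int) : Decidable (Spec_maxmatch1 T p W max_length out) := by unfold Spec_maxmatch1; infer_instance

-- ===== CLAIM (what is proved, stated in full; the proofs are below) =====
def Claim_equal_maxmatch1 : Prop := ∀ (T : String) (p : Int) (W : Int) (max_length : Int), Dom_maxmatch1 T p W max_length → Spec_maxmatch1 T p W max_length (maxmatch1 T p W max_length)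

-- ===== LEMMAS AND PROOFS =====

-- the match length at offset m: the least j with ¬(j < L ∧ T[p-m+j] == T[p+j])
def pvLen (T : String) (p L m : Int) : Nat :=
  Nat.find (p := fun j => ¬ (j < L.toNat ∧ pvCharEq T (p - m + (j : Int)) (p + (j : Int)) = true))
    ⟨L.toNat, by simp⟩

-- max match length over a list of offsets
def pvK (T : String) (p L : Int) (ms : List Int) : Nat :=
  ms.foldr (fun m acc => max (pvLen T p L m) acc) 0

lemma pvLen_le (T : String) (p L m : Int) : pvLen T p L m ≤ L.toNat := by
  exact Nat.find_le (by simp)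

lemma pvLen_ok (T : String) (p L m : Int) (j : Nat) (h : j < pvLen T p L m) :
    j < L.toNat ∧ pvCharEq T (p - m + (j : Int)) (p + (j : Int)) = true := by
  have := Nat.find_min (p := fun j => ¬ (j < L.toNat ∧ pvCharEq T (p - m + (j : Int)) (p + (j : Int)) = true))
    ⟨L.toNat, by simp⟩ h
  exact not_not.mp this

lemma pvLen_stop (T : String) (p L m : Int) :
    ¬ (pvLen T p L m < L.toNat ∧ pvCharEq T (p - m + (pvLen T p L m : Int)) (p + (pvLen T p L m : Int)) = true) :=
  Nat.find_spec (p := fun j => ¬ (j < L.toNat ∧ pvCharEq T (p - m + (j : Int)) (p + (j : Int)) = true)) ⟨L.toNat, by simp⟩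

-- survival through one filter round, for kn < L
lemma pvLen_succ_iff (T : String) (p L m : Int) (kn : Nat) (hk : kn < L.toNat) :
    kn + 1 ≤ pvLen T p L m ↔ (kn ≤ pvLen T p L m ∧ pvCharEq T (p - m + (kn : Int)) (p + (kn : Int)) = true) := by
  constructor
  · intro h
    exact ⟨Nat.le_of_succ_le h, (pvLen_ok T p L m kn h).2⟩
  · rintro ⟨hle, hok⟩
    rcases Nat.lt_or_ge kn (pvLen T p L m) with h | h
    · omega
    · have heq : pvLen T p L m = kn := le_antisymm h hle
      exfalso
      exact pvLen_stop T p L m (by rw [heq]; exact ⟨hk, hok⟩)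

-- A's inner while loop computes pvLen
lemma whileA_inv (T : String) (p L m : Int) :
    ∀ (fuel kn : Nat), L.toNat ≤ kn + fuel → kn ≤ pvLen T p L m →
      pvAWhile T p m L (kn : Int) fuel = (pvLen T p L m : Int) := by
  intro fuel
  induction fuel with
  | zero =>
      intro kn h1 h2
      have := pvLen_le T p L m
      have : pvLen T p L m = kn := by omega
      simp [pvAWhile, this]
  | succ f ih =>
      intro kn h1 h2
      rcases Nat.lt_or_ge kn (pvLen T p L m) with h | h
      · have hok := pvLen_ok T p L m kn h
        have hlt : ((kn : Int) < L) := by omega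
        have : pvAWhile T p m L (kn : Int) (f + 1) = pvAWhile T p m L ((kn : Int) + 1) f := by
          simp [pvAWhile, hlt, hok.2]
        rw [this, show ((kn : Int) + 1) = (((kn + 1 : Nat)) : Int) by push_cast; ring]
        exact ih (kn + 1) (by omega) h
      · have heq : pvLen T p L m = kn := le_antisymm h h2
        have hstop := pvLen_stop T p L m
        rw [heq] at hstop
        by_cases hlt : (kn : Int) < L
        · have hkn : kn < L.toNat := by omega
          have hok : pvCharEq T (p - m + (kn : Int)) (p + (kn : Int)) = false := by
            rcases Bool.eq_false_or_eq_true (pvCharEq T (p - m + (kn : Int)) (p + (kn : Int))) with h' | h'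
            · exact absurd ⟨hkn, h'⟩ hstop
            · exact h'
          simp [pvAWhile, hok, heq]
        · simp [pvAWhile, hlt, heq]


lemma whileA_top (T : String) (p L m : Int) :
    pvAWhile T p m L 0 L.toNat = (pvLen T p L m : Int) := by
  have := whileA_inv T p L m L.toNat 0 (by omega) (Nat.zero_le _)
  simpa using this

-- pvK facts
lemma pvK_ge (T : String) (p L : Int) (ms : List Int) (m : Int) (hm : m ∈ ms) :
    pvLen T p L m ≤ pvK T p L ms := by
  induction ms with
  | nil => cases hm
  | cons a rest ih =>
      rcases List.mem_cons.mp hm with h | h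
      · subst h; exact le_max_left _ _
      · exact le_trans (ih h) (le_max_right _ _)

lemma pvK_attained (T : String) (p L : Int) (ms : List Int) (h : 0 < pvK T p L ms) :
    ∃ m ∈ ms, pvLen T p L m = pvK T p L ms := by
  induction ms with
  | nil => simp [pvK] at h
  | cons a rest ih =>
      by_cases hc : pvK T p L rest ≤ pvLen T p L a
      · exact ⟨a, List.mem_cons_self, (max_eq_left hc).symm ▸ rfl⟩
      · rw [not_le] at hc
        have hK : pvK T p L (a :: rest) = pvK T p L rest := by
          simp [pvK] at *
          omega
        rw [hK] at h ⊢
        obtain ⟨m, hm, he⟩ := ih h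
        exact ⟨m, List.mem_cons_of_mem _ hm, he⟩

lemma pvK_le (T : String) (p L : Int) (ms : List Int) : pvK T p L ms ≤ L.toNat := by
  induction ms with
  | nil => simp [pvK]
  | cons a rest ih =>
      have := pvLen_le T p L a
      simp only [pvK, List.foldr_cons] at *
      omega

-- A's fold over the offsets computes (max length, first offset attaining it)
lemma foldA (T : String) (p L : Int) (ms : List Int) :
    ∀ (M : Nat) (o : Int),
      ms.foldl (fun (st : Int × Int) (m : Int) =>
          if st.1 < (pvLen T p L m : Int) then ((pvLen T p L m : Int), m) else st) ((M : Int), o)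
        = if pvK T p L ms ≤ M then ((M : Int), o)
          else ((pvK T p L ms : Int), (ms.find? (fun m => pvLen T p L m == pvK T p L ms)).getD o) := by
  induction ms with
  | nil => intro M o; simp [pvK]
  | cons a rest ih =>
      intro M o
      have hK : pvK T p L (a :: rest) = max (pvLen T p L a) (pvK T p L rest) := rfl
      simp only [List.foldl_cons]
      by_cases hstep : (M : Int) < (pvLen T p L a : Int)
      · have hM : M < pvLen T p L a := by exact_mod_cast hstep
        rw [if_pos hstep, ih (pvLen T p L a) a]
        have hKgt : ¬ pvK T p L (a :: rest) ≤ M := by rw [hK]; omega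
        rw [if_neg hKgt]
        by_cases hc : pvK T p L rest ≤ pvLen T p L a
        · rw [if_pos hc]
          have h1 : pvK T p L (a :: rest) = pvLen T p L a := by rw [hK]; omega
          have h2 : (a :: rest).find? (fun m => pvLen T p L m == pvK T p L (a :: rest)) = some a := by
            rw [List.find?_cons_of_pos]
            simp [h1]
          rw [h2, h1]
          simp
        · rw [not_le] at hc
          have h1 : pvK T p L (a :: rest) = pvK T p L rest := by rw [hK]; omega
          have h2 : (a :: rest).find? (fun m => pvLen T p L m == pvK T p L (a :: rest)) =
              rest.find? (fun m => pvLen T p L m == pvK T p L rest) := by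
            rw [h1, List.find?_cons_of_neg]
            simp; omega
          rw [if_neg (by omega), h2, h1]
          -- defaults differ (a vs o) but find? is some since the max is attained
          obtain ⟨m, hm, he⟩ := pvK_attained T p L rest (by omega)
          have : ∃ x, rest.find? (fun m => pvLen T p L m == pvK T p L rest) = some x := by
            rw [← Option.isSome_iff_exists, List.find?_isSome]
            exact ⟨m, hm, by simp [he]⟩
          obtain ⟨x, hx⟩ := this
          rw [hx]
          simp
      · have hM : pvLen T p L a ≤ M := by
          have : ¬ (M : Int) < (pvLen T p L a : Int) := hstep
          exact_mod_cast not_lt.mp this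
        rw [if_neg hstep, ih M o]
        by_cases hc : pvK T p L rest ≤ M
        · rw [if_pos hc, if_pos (by rw [hK]; omega)]
        · rw [not_le] at hc
          have h1 : pvK T p L (a :: rest) = pvK T p L rest := by rw [hK]; omega
          have h2 : (a :: rest).find? (fun m => pvLen T p L m == pvK T p L (a :: rest)) =
              rest.find? (fun m => pvLen T p L m == pvK T p L rest) := by
            rw [h1, List.find?_cons_of_neg]
            simp; omega
          rw [if_neg (by omega), if_neg (by rw [hK]; omega), h2, h1]

-- one filter round turns the '≥ kn' survivors into the '≥ kn+1' survivors
lemma filter_round (T : String) (p L : Int) (ms : List Int) (kn : Nat) (hk : kn < L.toNat) :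
    (ms.filter (fun m => decide (kn ≤ pvLen T p L m))).filter
        (fun m => pvCharEq T (p - m + (kn : Int)) (p + (kn : Int)))
      = ms.filter (fun m => decide (kn + 1 ≤ pvLen T p L m)) := by
  rw [List.filter_filter]
  apply List.filter_congr
  intro m _
  rcases Bool.eq_false_or_eq_true (pvCharEq T (p - m + (kn : Int)) (p + (kn : Int))) with h | h
  · have := pvLen_succ_iff T p L m kn hk
    by_cases h2 : kn ≤ pvLen T p L m
    · have h3 : kn + 1 ≤ pvLen T p L m := this.mpr ⟨h2, h⟩
      simp [h, h2, h3]
    · have h3 : ¬ (kn + 1 ≤ pvLen T p L m) := fun hc => h2 (this.mp hc).1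
      simp [h, h2, h3]
  · have : ¬ (kn + 1 ≤ pvLen T p L m) := by
      intro hcon
      have := (pvLen_ok T p L m kn hcon).2
      rw [h] at this; cases this
    simp [h, this]

-- B's loop invariant
lemma loopB (T : String) (p L : Int) (ms : List Int) :
    ∀ (fuel kn : Nat) (offset : Int),
      fuel + kn = L.toNat → kn ≤ pvK T p L ms →
      (kn = 0 → offset = 0) →
      (0 < kn → offset = (ms.filter (fun m => decide (kn ≤ pvLen T p L m))).headD 0) →
      pvBLoop T p L (kn : Int) offset (ms.filter (fun m => decide (kn ≤ pvLen T p L m))) fuel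
        = (if pvK T p L ms = 0 then 0
           else (ms.filter (fun m => decide (pvK T p L ms ≤ pvLen T p L m))).headD 0,
           (pvK T p L ms : Int)) := by
  intro fuel
  induction fuel with
  | zero =>
      intro kn offset h1 h2 h3 h4
      have hKle := pvK_le T p L ms
      have hkn : kn = pvK T p L ms := by omega
      simp only [pvBLoop]
      by_cases h0 : pvK T p L ms = 0
      · rw [if_pos h0]
        have : kn = 0 := by omega
        rw [h3 this, hkn, h0]
      · rw [if_neg h0]
        rw [h4 (by omega), hkn]
  | succ f ih =>
      intro kn offset h1 h2 h3 h4
      have hkL : kn < L.toNat := by omega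
      have hlt : ((kn : Int) < L) := by omega
      rcases Nat.lt_or_ge kn (pvK T p L ms) with h | h
      · -- continue: survivors at kn+1 are nonempty
        obtain ⟨m0, hm0, he0⟩ := pvK_attained T p L ms (by omega)
        have hmemk : m0 ∈ ms.filter (fun m => decide (kn ≤ pvLen T p L m)) :=
          List.mem_filter.mpr ⟨hm0, by simp; omega⟩
        have hne : (ms.filter (fun m => decide (kn ≤ pvLen T p L m))).isEmpty = false := by
          rw [List.isEmpty_eq_false_iff_exists_mem]; exact ⟨m0, hmemk⟩
        have hnxt := filter_round T p L ms kn hkL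
        have hmem1 : m0 ∈ ms.filter (fun m => decide (kn + 1 ≤ pvLen T p L m)) :=
          List.mem_filter.mpr ⟨hm0, by simp; omega⟩
        have hne1 : (ms.filter (fun m => decide (kn + 1 ≤ pvLen T p L m))).isEmpty = false := by
          rw [List.isEmpty_eq_false_iff_exists_mem]; exact ⟨m0, hmem1⟩
        simp only [pvBLoop, hlt, hne, decide_true, Bool.not_false, Bool.and_self, if_true,
          hnxt, hne1, if_false, Bool.false_eq_true]
        rw [show ((kn : Int) + 1) = (((kn + 1 : Nat)) : Int) by push_cast; ring]
        exact ih (kn + 1) _ (by omega) (by omega) (by omega) (fun _ => rfl)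
      · -- stop: kn = pvK, next round filters everyone out (or cands already empty)
        have hkn : kn = pvK T p L ms := by omega
        have hempty1 : ms.filter (fun m => decide (kn + 1 ≤ pvLen T p L m)) = [] := by
          rw [List.filter_eq_nil_iff]
          intro m hm
          have := pvK_ge T p L ms m hm
          simp; omega
        have hnxt := filter_round T p L ms kn hkL
        by_cases hcands : (ms.filter (fun m => decide (kn ≤ pvLen T p L m))).isEmpty = true
        · -- only possible when kn = 0 and ms = []
          simp only [pvBLoop, hlt, decide_true, hcands, Bool.not_true, Bool.and_false,
            if_false, Bool.false_eq_true]
          have hK0 : pvK T p L ms = 0 := by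
            by_contra hne0
            obtain ⟨m0, hm0, he0⟩ := pvK_attained T p L ms (by omega)
            have : m0 ∈ ms.filter (fun m => decide (kn ≤ pvLen T p L m)) :=
              List.mem_filter.mpr ⟨hm0, by simp; omega⟩
            rw [List.isEmpty_iff] at hcands
            simp [hcands] at this
          rw [if_pos hK0]
          have hkn0 : kn = 0 := by omega
          rw [h3 hkn0, hkn0, hK0]
        · have hne : (ms.filter (fun m => decide (kn ≤ pvLen T p L m))).isEmpty = false :=
            Bool.eq_false_iff.mpr hcands
          simp only [pvBLoop, hlt, decide_true, hne, Bool.not_false, Bool.and_self, if_true,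
            hnxt, hempty1, List.isEmpty_nil, if_true]
          by_cases hK0 : pvK T p L ms = 0
          · rw [if_pos hK0]
            have hkn0 : kn = 0 := by omega
            rw [h3 hkn0, hkn0, hK0]
          · rw [if_neg hK0]
            rw [h4 (by omega), hkn]

-- the two selections agree: head of the '≥ K' survivors = first offset with length = K
lemma head_eq_find (T : String) (p L : Int) (ms : List Int) :
    (ms.filter (fun m => decide (pvK T p L ms ≤ pvLen T p L m))).headD 0
      = (ms.find? (fun m => pvLen T p L m == pvK T p L ms)).getD 0 := by
  have hfil : ms.filter (fun m => decide (pvK T p L ms ≤ pvLen T p L m))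
      = ms.filter (fun m => pvLen T p L m == pvK T p L ms) := by
    apply List.filter_congr
    intro m hm
    have := pvK_ge T p L ms m hm
    by_cases h : pvLen T p L m = pvK T p L ms
    · simp [h]
    · have : ¬ pvK T p L ms ≤ pvLen T p L m := by omega
      simp [h, this]
  rw [hfil, List.headD_eq_head?_getD, List.head?_filter]

-- ===== VERDICT (by name: the statement is the Claim_ definition above) =====
theorem maxmatch1_spec : Claim_equal_maxmatch1 := by
  intro T p W max_length _
  unfold Spec_maxmatch1 maxmatch1 maxmatch1_alt
  set n : Int := PySem.Str.len T with hn
  set L : Int := min (n - p) max_length with hL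
  set ms : List Int := PySem.List.pyRange 1 (1 + min p W) 1 with hms
  -- rewrite A's fold body via the while-loop characterisation
  have hfun : (fun (st : Int × Int) (m : Int) =>
        let L' := min (n - p) max_length
        let k := pvAWhile T p m L' 0 L'.toNat
        if st.1 < k then (k, m) else st)
      = (fun (st : Int × Int) (m : Int) =>
        if st.1 < (pvLen T p L m : Int) then ((pvLen T p L m : Int), m) else st) := by
    funext st m
    simp only [← hL, whileA_top]
  simp only [hfun]
  have hA := foldA T p L ms 0 0
  simp only [Nat.cast_zero] at hA
  rw [hA]
  -- B's loop via its invariant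
  have hfil0 : ms.filter (fun m => decide (0 ≤ pvLen T p L m)) = ms := by
    simp
  have hB := loopB T p L ms L.toNat 0 0 (by omega) (Nat.zero_le _) (fun _ => rfl) (by omega)
  rw [hfil0] at hB
  simp only [Nat.cast_zero] at hB
  rw [hB]
  by_cases hK : pvK T p L ms = 0
  · rw [if_pos (by omega), if_pos hK]
    simp [hK]
  · rw [if_neg (by omega), if_neg hK]
    simp only [head_eq_find]
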